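-- pv_equiv track=rewrite | github.com/saisankargochhayat/algo_quest | Company-Based/roblox/word_compression.py | compressWord
-- ===== SOURCE A (Python) =====
-- def compressWord(word: str, k: int):
--     # Lets define a stack to maintain stream of letters.
--     from collections import deque
--     stck = deque([])
--     for c in word:
--         if stck:
--             old_c, val = stck[-1]
--             if old_c == c:
--                 stck.append((c, val+1))
--             else:
--                 stck.append((c, 1))
--         else:
--             stck.append((c, 1))
--         # Now we check if top element has been repeated k times and remove it.
--         old_c, val = stck[-1]
--         if val == k:
--             # Remove k elements
--             for i in range(k):
--                 stck.pop()
--     cArray = [c for c, v in stck]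
--     return ''.join(cArray)
-- ===== SOURCE B (Python) =====
-- def compressWord(word: str, k: int):
--     # Run-scanning with modular arithmetic: consume each maximal block of equal
--     # chars at once, merge it with the top run, and keep count % k (for k > 0)
--     # instead of popping per character.
--     runs = []
--     i, n = 0, len(word)
--     while i < n:
--         j = i
--         while j < n and word[j] == word[i]:
--             j += 1
--         cnt = j - i
--         if runs and runs[-1][0] == word[i]:
--             cnt += runs.pop()[1]
--         if k > 0:
--             cnt %= k
--         if cnt:
--             runs.append((word[i], cnt))
--         i = j
--     return ''.join(c * v for c, v in runs)
-- ===== Notes on version B (the rewrite author's own statement) =====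
-- stated objective: alternative
-- what changed: A streams characters one at a time onto a stack of (char,count) entries and removes k entries with an inner pop loop when the top count hits k; B scans each maximal block of equal characters at once with an index loop, merges the block length with the top run and reduces it modulo k (for k>0), so there is no per-character stack traffic and no pop loop at all.
import Mathlib
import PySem

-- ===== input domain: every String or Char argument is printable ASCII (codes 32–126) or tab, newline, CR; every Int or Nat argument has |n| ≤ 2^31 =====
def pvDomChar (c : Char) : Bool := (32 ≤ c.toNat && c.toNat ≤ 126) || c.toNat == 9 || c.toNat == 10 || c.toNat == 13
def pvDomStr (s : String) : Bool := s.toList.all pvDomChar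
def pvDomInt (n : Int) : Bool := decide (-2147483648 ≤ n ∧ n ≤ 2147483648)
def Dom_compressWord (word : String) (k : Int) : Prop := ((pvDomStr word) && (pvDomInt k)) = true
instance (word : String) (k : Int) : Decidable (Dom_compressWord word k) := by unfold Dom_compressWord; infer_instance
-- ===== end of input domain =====

-- B replaces A's per-character stack with inner pop-k loop by a run-scanning index loop
-- that merges each maximal equal-character block into the top run modulo k; objective:
-- alternative, same return value.

-- ===== PORT A =====
-- A's deque is a List (Char × Int) with the TOP at the HEAD (stck[-1] = head,
-- append = cons, pop = tail); the final ''.join therefore reverses the list.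
-- One iteration of A's for-loop body:
def pvAStep (k : Int) (stck : List (Char × Int)) (c : Char) : List (Char × Int) :=
  let stck' :=
    match stck with
    | (old_c, val) :: _ => if old_c = c then (c, val + 1) :: stck else (c, 1) :: stck
    | [] => (c, 1) :: stck
  match stck' with
  | (_, val) :: _ =>
      if val = k then stck'.drop k.toNat  -- 'for i in range(k): stck.pop()'
      else stck'
  | [] => stck'  -- unreachable: stck' is nonempty

def compressWord (word : String) (k : Int) : String :=
  String.ofList (((word.toList.foldl (pvAStep k) []).reverse).map Prod.fst)

-- ===== PORT B =====
-- 'while j < n and word[j] == word[i]: j += 1' — length of the block of c's at the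
-- front of the remaining suffix (j - i = pvSpanLen c cs + 1 for suffix c :: cs):
def pvSpanLen (c : Char) : List Char → Nat
  | x :: xs => if x = c then pvSpanLen c xs + 1 else 0
  | [] => 0

-- B's outer 'while i < n' loop over the remaining suffix; runs stack top at the head.
def pvBLoop (k : Int) : List Char → List (Char × Int) → List (Char × Int)
  | [], runs => runs
  | c :: cs, runs =>
      let m : Nat := pvSpanLen c cs + 1                 -- cnt = j - i
      let p : Int × List (Char × Int) :=                -- 'cnt += runs.pop()[1]'
        match runs with
        | (oc, v) :: rest => if oc = c then ((m : Int) + v, rest) else ((m : Int), runs)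
        | [] => ((m : Int), runs)
      let cnt := if 0 < k then PySem.Int.mod p.1 k else p.1   -- 'if k > 0: cnt %= k'
      let runs' := if cnt ≠ 0 then (c, cnt) :: p.2 else p.2   -- 'if cnt: runs.append(...)'
      pvBLoop k (cs.drop (pvSpanLen c cs)) runs'              -- i = j
  termination_by cs => cs.length
  decreasing_by simp

def compressWord_alt (word : String) (k : Int) : String :=
  String.ofList ((pvBLoop k word.toList []).reverse.flatMap
    (fun p => List.replicate p.2.toNat p.1))  -- ''.join(c * v for c, v in runs)

-- ===== PRECONDITION & SPEC =====
def Spec_compressWord (word : String) (k : Int) (out : String) : Prop := out = compressWord_alt word k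
instance (word : String) (k : Int) (out : String) : Decidable (Spec_compressWord word k out) := by unfold Spec_compressWord; infer_instance

-- ===== CLAIM (what is proved, stated in full; the proofs are below) =====
def Claim_equal_compressWord : Prop := ∀ (word : String) (k : Int), Dom_compressWord word k → Spec_compressWord word k (compressWord word k)

-- ===== LEMMAS AND PROOFS =====

-- A run (c, v) of B corresponds to the A-stack segment (c,v), (c,v-1), …, (c,1).
def pvExpandRun (p : Char × Int) : List (Char × Int) :=
  (List.range p.2.toNat).map (fun (i : Nat) => (p.1, p.2 - (i : Int)))

def pvExpand (runs : List (Char × Int)) : List (Char × Int) :=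
  runs.flatMap pvExpandRun

-- invariant of B's run stack: counts in [1, k) (upper bound only for k > 0),
-- adjacent runs carry distinct characters
def pvInv (k : Int) (runs : List (Char × Int)) : Prop :=
  (∀ p ∈ runs, 1 ≤ p.2 ∧ (0 < k → p.2 < k)) ∧
  List.IsChain (fun p q : Char × Int => p.1 ≠ q.1) runs

-- the count after playing m repetitions of the same char through A's loop
def pvIter (k : Int) : Nat → Int → Int
  | 0, v => v
  | m + 1, v => pvIter k m (if v + 1 = k then 0 else v + 1)

lemma pvExpandRun_pos (c : Char) (v : Int) (hv : 1 ≤ v) :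
    pvExpandRun (c, v) = (c, v) :: pvExpandRun (c, v - 1) := by
  have h : v.toNat = (v - 1).toNat + 1 := by omega
  simp only [pvExpandRun]
  rw [h, List.range_succ_eq_map, List.map_cons, List.map_map]
  refine congrArg₂ List.cons (by simp) ?_
  apply List.map_congr_left
  intro i hi
  simp only [Function.comp_apply]
  refine congrArg (Prod.mk c) ?_
  push_cast; ring

lemma pvExpandRun_nonpos (c : Char) (v : Int) (hv : v ≤ 0) : pvExpandRun (c, v) = [] := by
  simp [pvExpandRun, Int.toNat_of_nonpos hv]

lemma pvExpandRun_length (c : Char) (v : Int) : (pvExpandRun (c, v)).length = v.toNat := by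
  simp [pvExpandRun]

lemma pvSpan_decomp (c : Char) : ∀ cs : List Char,
    cs = List.replicate (pvSpanLen c cs) c ++ cs.drop (pvSpanLen c cs) := by
  intro cs
  induction cs with
  | nil => rfl
  | cons x xs ih =>
      by_cases h : x = c
      · subst h
        simp only [pvSpanLen, if_pos]
        rw [List.replicate_succ, List.cons_append, List.drop_succ_cons]
        exact congrArg (x :: ·) ih
      · simp [pvSpanLen, h]

-- one A-step with character c on a stack whose top c-block has count v (possibly 0)
lemma pvAStep_run (k : Int) (c : Char) (v : Int) (E : List (Char × Int))
    (hv : 0 ≤ v)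
    (hE : ∀ y ∈ E.head?, y.1 ≠ c) :
    pvAStep k (pvExpandRun (c, v) ++ E) c
      = pvExpandRun (c, if v + 1 = k then 0 else v + 1) ++ E := by
  by_cases hv1 : 1 ≤ v
  · -- top of stack is (c, v)
    rw [pvExpandRun_pos c v hv1]
    have hstep : pvAStep k (((c, v) :: pvExpandRun (c, v - 1)) ++ E) c
        = if v + 1 = k then (((c, v + 1) :: (c, v) :: (pvExpandRun (c, v - 1) ++ E)).drop k.toNat)
          else (c, v + 1) :: (c, v) :: (pvExpandRun (c, v - 1) ++ E) := by
      simp [pvAStep]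
    rw [hstep]
    split_ifs with hk
    · -- pop of k entries removes exactly the c-block
      have hfull : (c, v + 1) :: (c, v) :: (pvExpandRun (c, v - 1) ++ E)
          = (pvExpandRun (c, v + 1)) ++ E := by
        rw [pvExpandRun_pos c (v + 1) (by omega), pvExpandRun_pos c (v + 1 - 1) (by omega)]
        simp
      have hlen : (pvExpandRun (c, v + 1)).length = k.toNat := by
        rw [pvExpandRun_length]; omega
      rw [hfull, ← hlen, List.drop_left, pvExpandRun_nonpos c 0 le_rfl, List.nil_append]
    · rw [pvExpandRun_pos c (v + 1) (by omega), pvExpandRun_pos c (v + 1 - 1) (by omega)]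
      simp
  · -- v = 0: the c-block is empty, top of stack is E's head (≠ c) or nothing
    have hv0 : v = 0 := by omega
    subst hv0
    rw [pvExpandRun_nonpos c 0 le_rfl, List.nil_append, zero_add]
    have hstep : pvAStep k E c
        = if (1 : Int) = k then (((c, 1) :: E).drop k.toNat) else (c, 1) :: E := by
      cases E with
      | nil => simp [pvAStep]
      | cons y ys =>
          have hy : y.1 ≠ c := hE y (by simp)
          cases y with
          | mk oc w => simp [pvAStep, hy]
    rw [hstep]
    by_cases hk : (1 : Int) = k
    · rw [if_pos hk, if_pos hk, ← hk]
      rw [pvExpandRun_nonpos c 0 le_rfl, List.nil_append]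
      rfl
    · rw [if_neg hk, if_neg hk]
      rw [pvExpandRun_pos c 1 le_rfl, pvExpandRun_nonpos c (1 - 1) (by omega)]
      rfl

lemma pvFoldA_replicate (k : Int) (c : Char) (E : List (Char × Int))
    (hE : ∀ y ∈ E.head?, y.1 ≠ c) :
    ∀ (m : Nat) (v : Int), 0 ≤ v →
    (List.replicate m c).foldl (pvAStep k) (pvExpandRun (c, v) ++ E)
      = pvExpandRun (c, pvIter k m v) ++ E := by
  intro m
  induction m with
  | zero => intro v _; rfl
  | succ m ih =>
      intro v hv
      rw [List.replicate_succ, List.foldl_cons, pvAStep_run k c v E hv hE]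
      exact ih _ (by split_ifs <;> omega)

lemma pvIter_closed (k : Int) : ∀ (m : Nat) (v : Int), 0 ≤ v → (0 < k → v < k) →
    pvIter k m v = if 0 < k then (v + (m : Int)) % k else v + (m : Int) := by
  intro m
  induction m with
  | zero =>
      intro v hv hvk
      by_cases hk : 0 < k
      · simp [pvIter, hk, Int.emod_eq_of_lt hv (hvk hk)]
      · simp [pvIter, hk]
  | succ m ih =>
      intro v hv hvk
      by_cases hk : 0 < k
      · by_cases hvk1 : v + 1 = k
        · rw [show pvIter k (m + 1) v = pvIter k m 0 by simp [pvIter, hvk1],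
            ih 0 le_rfl (fun _ => hk)]
          simp only [if_pos hk]
          push_cast
          rw [show v + ((m : Int) + 1) = k + (m : Int) from by omega, Int.add_emod_left]
          simp
        · rw [show pvIter k (m + 1) v = pvIter k m (v + 1) by simp [pvIter, hvk1],
            ih (v + 1) (by omega) (fun h => by have := hvk h; omega)]
          simp only [if_pos hk]
          push_cast
          ring_nf
      · have hne : ¬ (v + 1 = k) := by omega
        rw [show pvIter k (m + 1) v = pvIter k m (v + 1) by simp [pvIter, hne],
          ih (v + 1) (by omega) (fun h => absurd h hk)]
        simp only [if_neg hk]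
        push_cast
        ring

lemma pvExpand_head_ne (runs : List (Char × Int)) (c : Char)
    (hpos : ∀ p ∈ runs, 1 ≤ p.2)
    (hne : ∀ p ∈ runs.head?, p.1 ≠ c) :
    ∀ y ∈ (pvExpand runs).head?, y.1 ≠ c := by
  intro y hy
  cases runs with
  | nil => simp [pvExpand] at hy
  | cons p rest =>
      have hp1 : 1 ≤ p.2 := (hpos p (by simp))
      rw [show pvExpand (p :: rest) = pvExpandRun p ++ pvExpand rest from rfl,
        show p = (p.1, p.2) from rfl, pvExpandRun_pos p.1 p.2 hp1] at hy
      simp only [List.cons_append, List.head?_cons, Option.mem_def, Option.some.injEq] at hy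
      subst hy
      exact hne p (by simp)

-- map fst of a reversed expansion is the reversed run-length decompression
lemma pvExpand_fst (runs : List (Char × Int)) :
    ((pvExpand runs).reverse).map Prod.fst
      = (runs.reverse).flatMap (fun p => List.replicate p.2.toNat p.1) := by
  induction runs with
  | nil => rfl
  | cons p rest ih =>
      rcases p with ⟨c, v⟩
      simp only [pvExpand, List.flatMap_cons, List.reverse_append, List.map_append,
        List.reverse_cons, List.flatMap_append, List.flatMap_cons, List.flatMap_nil,
        List.append_nil] at *
      rw [ih]
      refine congrArg₂ _ rfl ?_
      simp only [pvExpandRun, List.map_reverse, List.map_map]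
      rw [List.eq_replicate_iff]
      refine ⟨by simp, ?_⟩
      intro a ha
      simp only [List.mem_reverse, List.mem_map, List.mem_range] at ha
      obtain ⟨i, _, h2⟩ := ha
      exact h2.symm

-- the main simulation: folding A's per-character step over the suffix from the
-- expansion of B's run stack yields the expansion of B's loop result
lemma pvMain (k : Int) : ∀ (n : Nat) (cs : List Char), cs.length ≤ n →
    ∀ runs, pvInv k runs →
    cs.foldl (pvAStep k) (pvExpand runs) = pvExpand (pvBLoop k cs runs) := by
  intro n
  induction n with
  | zero =>
      intro cs hlen runs _
      have : cs = [] := List.eq_nil_of_length_eq_zero (by omega)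
      subst this
      simp [pvBLoop]
  | succ n ih =>
      intro cs hlen runs hinv
      cases cs with
      | nil => simp [pvBLoop]
      | cons c cs =>
          obtain ⟨hcnt, hchain⟩ := hinv
          -- the (v, runs₂) decomposition: top c-count v, remainder runs₂ with head ≠ c,
          -- together with the one-step equation for B's loop
          obtain ⟨v, runs₂, hv0, hvk, hsplit, hne, hcnt₂, hchain₂, hB⟩ :
              ∃ (v : Int) (runs₂ : List (Char × Int)),
                0 ≤ v ∧ (0 < k → v < k) ∧
                pvExpand runs = pvExpandRun (c, v) ++ pvExpand runs₂ ∧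
                (∀ p ∈ runs₂.head?, p.1 ≠ c) ∧
                (∀ p ∈ runs₂, 1 ≤ p.2 ∧ (0 < k → p.2 < k)) ∧
                List.IsChain (fun p q : Char × Int => p.1 ≠ q.1) runs₂ ∧
                pvBLoop k (c :: cs) runs
                  = pvBLoop k (cs.drop (pvSpanLen c cs))
                      (if (if 0 < k then PySem.Int.mod (v + ((pvSpanLen c cs + 1 : Nat) : Int)) k
                           else v + ((pvSpanLen c cs + 1 : Nat) : Int)) ≠ 0
                       then (c, if 0 < k then PySem.Int.mod (v + ((pvSpanLen c cs + 1 : Nat) : Int)) k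
                                 else v + ((pvSpanLen c cs + 1 : Nat) : Int)) :: runs₂
                       else runs₂) := by
            cases runs with
            | nil =>
                refine ⟨0, [], le_rfl, fun _ => by omega,
                  by simp [pvExpand, pvExpandRun_nonpos c 0 le_rfl], by simp, by simp,
                  List.isChain_nil, ?_⟩
                simp [pvBLoop]
            | cons p rest =>
                rcases p with ⟨oc, w⟩
                obtain ⟨hhead, hchain'⟩ := List.isChain_cons.mp hchain
                by_cases hoc : oc = c
                · subst hoc
                  refine ⟨w, rest, by have := (hcnt (oc, w) (by simp)).1; omega,
                    (hcnt (oc, w) (by simp)).2, rfl, fun p hp => Ne.symm (hhead p hp),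
                    fun p hp => hcnt p (List.mem_cons_of_mem _ hp), hchain', ?_⟩
                  simp [pvBLoop, add_comm]
                · refine ⟨0, (oc, w) :: rest, le_rfl, fun _ => by omega,
                    by simp [pvExpand, pvExpandRun_nonpos c 0 le_rfl], ?_,
                    hcnt, hchain, by simp [pvBLoop, hoc]⟩
                  intro p hp
                  simp only [List.head?_cons, Option.mem_def, Option.some.injEq] at hp
                  subst hp
                  exact hoc
          -- split the word into the leading c-block and the rest
          have hword : c :: cs
              = List.replicate (pvSpanLen c cs + 1) c ++ cs.drop (pvSpanLen c cs) := by
            rw [List.replicate_succ, List.cons_append]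
            exact congrArg (c :: ·) (pvSpan_decomp c cs)
          have hEne : ∀ y ∈ (pvExpand runs₂).head?, y.1 ≠ c :=
            pvExpand_head_ne runs₂ c (fun p hp => (hcnt₂ p hp).1) hne
          rw [hB]
          conv_lhs => rw [hword]
          rw [List.foldl_append, hsplit,
            pvFoldA_replicate k c (pvExpand runs₂) hEne _ v hv0,
            pvIter_closed k _ v hv0 hvk]
          set m : Int := ((pvSpanLen c cs + 1 : Nat) : Int) with hm
          set cnt : Int := if 0 < k then PySem.Int.mod (v + m) k else v + m with hcntdef
          have hcnteq : (if 0 < k then (v + m) % k else v + m) = cnt := by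
            rw [hcntdef]
            split_ifs with hk
            · exact (PySem.Int.mod_eq_emod_of_pos hk).symm
            · rfl
          rw [hcnteq]
          have hcnt0 : 0 ≤ cnt := by
            rw [hcntdef]
            split_ifs with hk
            · rw [PySem.Int.mod_eq_emod_of_pos hk]
              exact Int.emod_nonneg _ (by omega)
            · have : (1 : Int) ≤ m := by rw [hm]; push_cast; omega
              omega
          have hcntk : 0 < k → cnt < k := by
            intro hk
            rw [hcntdef, if_pos hk, PySem.Int.mod_eq_emod_of_pos hk]
            exact Int.emod_lt_of_pos _ hk
          -- expansion of the new run stack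
          have hexp : pvExpandRun (c, cnt) ++ pvExpand runs₂
              = pvExpand (if cnt ≠ 0 then (c, cnt) :: runs₂ else runs₂) := by
            split_ifs with hc0
            · rfl
            · rw [not_not] at hc0
              rw [hc0, pvExpandRun_nonpos c 0 le_rfl, List.nil_append]
          rw [hexp]
          -- invariant for the new run stack, then the induction hypothesis
          have hinv' : pvInv k (if cnt ≠ 0 then (c, cnt) :: runs₂ else runs₂) := by
            split_ifs with hc0
            · refine ⟨?_, List.isChain_cons.mpr ⟨fun y hy => Ne.symm (hne y hy), hchain₂⟩⟩
              intro p hp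
              rcases List.mem_cons.mp hp with h1 | h1
              · subst h1; exact ⟨by omega, hcntk⟩
              · exact hcnt₂ p h1
            · exact ⟨hcnt₂, hchain₂⟩
          have hlen' : (cs.drop (pvSpanLen c cs)).length ≤ n := by
            have h1 : cs.length ≤ n := by simpa using Nat.lt_succ_iff.mp (by simpa using hlen)
            have := List.length_drop (i := pvSpanLen c cs) (l := cs)
            omega
          exact ih _ hlen' _ hinv'

-- ===== VERDICT (by name: the statement is the Claim_ definition above) =====
theorem compressWord_spec : Claim_equal_compressWord := by
  intro word k _
  show compressWord word k = compressWord_alt word k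
  unfold compressWord compressWord_alt
  have h := pvMain k word.toList.length word.toList le_rfl [] ⟨by simp, List.isChain_nil⟩
  rw [show pvExpand ([] : List (Char × Int)) = [] from rfl] at h
  rw [h, pvExpand_fst]
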